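-- pv_equiv track=rewrite | github.com/HEJA100/capstone-logo-selected-modules | 02_LOGO_Promoter/eval_both_knowledge.py | pick_valid_key
-- ===== SOURCE A (Python) =====
-- def pick_valid_key(keys):
--     for k in keys:
--         lk = k.lower()
--         if "valid" in lk:
--             return k
--     for k in keys:
--         lk = k.lower()
--         if "test" in lk:
--             return k
--     # fallback: second array if present
--     if len(keys) >= 2:
--         return keys[1]
--     return keys[0]
-- ===== SOURCE B (Python) =====
-- def pick_valid_key(keys):
--     test_key = None
--     for k in keys:
--         lk = k.lower()
--         if "valid" in lk:
--             return k
--         if test_key is None and "test" in lk: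
--             test_key = k
--     if test_key is not None:
--         return test_key
--     return keys[1] if len(keys) >= 2 else keys[0]
-- ===== Notes on version B (the rewrite author's own statement) =====
-- stated objective: simpler
-- what changed: Two sequential scans (first for 'valid', then for 'test') are fused into one pass that returns immediately on a 'valid' key while recording the first 'test' candidate.
-- outside the precondition, e.g. on pick_valid_key([]): A raises IndexError, B raises IndexError
import Mathlib
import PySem

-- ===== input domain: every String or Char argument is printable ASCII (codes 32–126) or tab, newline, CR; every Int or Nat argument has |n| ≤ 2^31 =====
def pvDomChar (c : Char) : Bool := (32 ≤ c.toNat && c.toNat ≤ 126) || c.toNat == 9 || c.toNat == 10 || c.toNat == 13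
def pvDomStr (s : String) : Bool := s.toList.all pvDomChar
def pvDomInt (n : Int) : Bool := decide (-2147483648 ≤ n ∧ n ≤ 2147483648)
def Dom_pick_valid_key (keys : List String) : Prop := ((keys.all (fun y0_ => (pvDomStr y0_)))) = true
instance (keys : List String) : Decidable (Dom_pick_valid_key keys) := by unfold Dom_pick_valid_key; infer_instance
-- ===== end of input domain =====

-- B fuses A's two sequential scans into one pass: return on the first 'valid' key,
-- record the first 'test' candidate along the way (objective: simpler).


-- ===== PORT A =====
-- first loop: first key whose lowercase contains "valid"
def pickA_loop1 : List String → Option String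
  | [] => none
  | k :: rest =>
    if PySem.Str.isIn "valid" (PySem.Str.lower k) then some k else pickA_loop1 rest

-- second loop: first key whose lowercase contains "test"
def pickA_loop2 : List String → Option String
  | [] => none
  | k :: rest =>
    if PySem.Str.isIn "test" (PySem.Str.lower k) then some k else pickA_loop2 rest

def pick_valid_key (keys : List String) : String :=
  match pickA_loop1 keys with
  | some k => k
  | none =>
    match pickA_loop2 keys with
    | some k => k
    | none =>
      if keys.length ≥ 2 then (PySem.List.pyGet? keys 1).getD ""
      else (PySem.List.pyGet? keys 0).getD ""   -- keys[0]: IndexError on [] → outside Pre_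

-- ===== PORT B =====
-- one pass: return on "valid", remember the first "test" candidate; then fallback
def pickB_go (keys : List String) : List String → Option String → String
  | [], testKey =>
    match testKey with
    | some t => t
    | none =>
      if keys.length ≥ 2 then (PySem.List.pyGet? keys 1).getD ""
      else (PySem.List.pyGet? keys 0).getD ""   -- keys[0]: IndexError on [] → outside Pre_
  | k :: rest, testKey =>
    if PySem.Str.isIn "valid" (PySem.Str.lower k) then k
    else pickB_go keys rest
      (if testKey.isNone && PySem.Str.isIn "test" (PySem.Str.lower k) then some k else testKey)

def pick_valid_key_alt (keys : List String) : String := pickB_go keys keys none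

-- ===== PRECONDITION & SPEC =====
-- Pre_ excludes only the empty list, on which A raises IndexError at the final fallback.
def Pre_pick_valid_key (keys : List String) : Prop := keys ≠ []
instance (keys : List String) : Decidable (Pre_pick_valid_key keys) := by unfold Pre_pick_valid_key; infer_instance
def pvWitness_pick_valid_key : List String := (["alpha", "my_test", "validation"])

def Spec_pick_valid_key (keys : List String) (out : String) : Prop := out = pick_valid_key_alt keys
instance (keys : List String) (out : String) : Decidable (Spec_pick_valid_key keys out) := by unfold Spec_pick_valid_key; infer_instance

-- ===== CLAIM (what is proved, stated in full; the proofs are below) =====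
def Claim_equal_pick_valid_key : Prop := ∀ (keys : List String), Dom_pick_valid_key keys → Pre_pick_valid_key keys → Spec_pick_valid_key keys (pick_valid_key keys)

-- ===== LEMMAS AND PROOFS =====

-- B's single pass, started with candidate `tc`, equals: first 'valid' in the suffix,
-- else `tc`, else first 'test' in the suffix, else A's fallback.
theorem pickB_go_char (keys : List String) :
    ∀ (rest : List String) (tc : Option String),
      pickB_go keys rest tc =
        match pickA_loop1 rest with
        | some k => k
        | none =>
          match tc with
          | some t => t
          | none =>
            match pickA_loop2 rest with
            | some k => k
            | none =>
              if keys.length ≥ 2 then (PySem.List.pyGet? keys 1).getD ""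
              else (PySem.List.pyGet? keys 0).getD "" := by
  intro rest
  induction rest with
  | nil => intro tc; cases tc <;> rfl
  | cons k rest ih =>
    intro tc
    cases tc <;>
      simp only [pickB_go, pickA_loop1, pickA_loop2, ih] <;>
      split_ifs <;> simp_all

-- ===== VERDICT (by name: the statement is the Claim_ definition above) =====
theorem pick_valid_key_spec : Claim_equal_pick_valid_key := by
  intro keys _ _
  unfold Spec_pick_valid_key pick_valid_key pick_valid_key_alt
  rw [pickB_go_char]
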